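-- pv_equiv track=rewrite | github.com/TrellixVulnTeam/Traffic_WHES | server/Clean_Data.py | linearMovement
-- ===== SOURCE A (Python) =====
-- def linearMovement(start, path):
--     index = 1
--     if len(path) < 2:
--         return
--     # check if the movement is from higher to lower numbers or vice versa
--     directionX = checkForDirection(start, path[index], 0)
--     directionY = checkForDirection(start, path[index], 1)
--     while index < len(path):
--         # if not the last location in path
--         if index != len(path) - 1:
--             if directionX == "unknown":
--                 directionX = checkForDirection(path[index], path[index + 1], 0)
--             if directionY == "unknown":
--                 directionY = checkForDirection(path[index], path[index + 1], 1)
--             # if isOK = True, move to the next index else 'fix' the location in index+1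
--             isOkX = checkIfLinear(path[index], path[index + 1], directionX, 0)
--             if not isOkX:
--                 path[index + 1][0] = path[index][0]
--             isOkY = checkIfLinear(path[index], path[index + 1], directionY, 1)
--             if not isOkY:
--                 path[index + 1][1] = path[index][1]
--             else:
--                 index += 1
--         else:
--             index += 1
--     return path
--
-- def checkForDirection(locFrom, locTo, xORy):
--     direction = "unknown"
--     if locFrom[xORy] > locTo[xORy]:
--         direction = "down"
--     elif locFrom[xORy] < locTo[xORy]:
--         direction = "up"
--     # else there is no difference between the locations
--     return direction
--
-- def checkIfLinear(locFrom, locTo, direction, xORy):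
--     ans = True
--     if direction != "unknown":
--         if direction == "up":
--             if locFrom[xORy] > locTo[xORy]:
--                 ans = False
--         else:  # direction = down
--             if locTo[xORy] > locFrom[xORy]:
--                 ans = False
--     return ans
-- ===== SOURCE B (Python) =====
-- # B: two coordinate-specialized sweeps (x-pass then y-pass), each walking the
-- # points once with a running direction, instead of one interleaved index loop
-- # that re-visits an index after a y-fix.  Mutates the inner lists in place
-- # like A and returns the same list (None when len(path) < 2).
--
-- def linearMovement(start, path):
--     if len(path) < 2:
--         return None
--     for c in (0, 1):
--         prev = path[1][c]
--         d = _cmp(start[c], prev)          # -1 = up, 1 = down, 0 = unknown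
--         for p in path[2:]:
--             if d == 0:
--                 d = _cmp(prev, p[c])
--             if (d < 0 and p[c] < prev) or (d > 0 and p[c] > prev):
--                 p[c] = prev
--             prev = p[c]
--     return path
--
-- def _cmp(a, b):
--     return -1 if a < b else (1 if a > b else 0)
-- ===== Notes on version B (the rewrite author's own statement) =====
-- stated objective: alternative
-- what changed: A's single interleaved sweep with an index that is re-visited after every y-fix is replaced by two sequential coordinate-specialized one-pass sweeps (x then y), each walking the points once with a running direction and previous value.
import Mathlib
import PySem

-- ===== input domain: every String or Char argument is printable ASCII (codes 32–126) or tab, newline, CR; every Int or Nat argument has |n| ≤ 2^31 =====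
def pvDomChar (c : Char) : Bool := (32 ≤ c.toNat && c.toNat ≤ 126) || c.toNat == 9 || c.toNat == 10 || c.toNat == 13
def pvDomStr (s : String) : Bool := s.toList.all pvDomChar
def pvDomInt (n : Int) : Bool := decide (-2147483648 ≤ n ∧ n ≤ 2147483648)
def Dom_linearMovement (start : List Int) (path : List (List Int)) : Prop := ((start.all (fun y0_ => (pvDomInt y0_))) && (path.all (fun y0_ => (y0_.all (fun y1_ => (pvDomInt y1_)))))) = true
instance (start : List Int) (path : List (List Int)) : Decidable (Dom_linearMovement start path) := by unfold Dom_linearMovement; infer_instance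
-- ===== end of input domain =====

-- B replaces A's single interleaved index-retrying sweep by two coordinate-specialized
-- one-pass sweeps (objective: alternative decomposition, not claimed faster).
-- Both Pythons mutate the inner point lists in place; the equivalence proved here is
-- about the RETURN value only (the mutations happen to coincide as well, unproved).

-- ===== PORT A =====
-- list indexing is ported with getD; Pre_linearMovement keeps every index A uses in
-- range, so getD agrees with Python indexing (IndexError inputs are excluded).
def checkForDirection (locFrom locTo : List Int) (xORy : Nat) : String :=
  if locFrom.getD xORy 0 > locTo.getD xORy 0 then "down"
  else if locFrom.getD xORy 0 < locTo.getD xORy 0 then "up"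
  else "unknown"

def checkIfLinear (locFrom locTo : List Int) (direction : String) (xORy : Nat) : Bool :=
  if direction ≠ "unknown" then
    if direction = "up" then
      if locFrom.getD xORy 0 > locTo.getD xORy 0 then false else true
    else
      if locTo.getD xORy 0 > locFrom.getD xORy 0 then false else true
  else true

-- the while loop; fuel only makes it total: every index is visited at most twice
-- (a y-fix makes the next visit advance), so the fuel given below is never exhausted.
def loopA : Nat → Nat → String → String → List (List Int) → List (List Int)
  | 0, _, _, _, path => path
  | fuel+1, index, dx, dy, path =>
    if index < path.length then
      if index ≠ path.length - 1 then
        let cur := path.getD index []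
        let nxt := path.getD (index+1) []
        let dx := if dx = "unknown" then checkForDirection cur nxt 0 else dx
        let dy := if dy = "unknown" then checkForDirection cur nxt 1 else dy
        let isOkX := checkIfLinear cur nxt dx 0
        let path1 := if isOkX then path else path.set (index+1) (nxt.set 0 (cur.getD 0 0))
        let isOkY := checkIfLinear cur (path1.getD (index+1) []) dy 1
        if isOkY then loopA fuel (index+1) dx dy path1
        else loopA fuel index dx dy (path1.set (index+1) ((path1.getD (index+1) []).set 1 (cur.getD 1 0)))
      else loopA fuel (index+1) dx dy path
    else path

def linearMovement (start : List Int) (path : List (List Int)) : Option (List (List Int)) :=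
  if path.length < 2 then none
  else
    let dx := checkForDirection start (path.getD 1 []) 0
    let dy := checkForDirection start (path.getD 1 []) 1
    some (loopA (2 * path.length + 2) 1 dx dy path)

-- ===== PORT B =====
def cmpI (a b : Int) : Int := if a < b then -1 else if a > b then 1 else 0

-- the inner 'for p in path[2:]' of one coordinate pass; in-place p[c] = prev becomes set
def bLoop (c : Nat) : Int → Int → List (List Int) → List (List Int)
  | _, _, [] => []
  | d, prev, p :: rest =>
    let v := p.getD c 0
    let d := if d = 0 then cmpI prev v else d
    if (d < 0 ∧ v < prev) ∨ (d > 0 ∧ v > prev) then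
      p.set c prev :: bLoop c d prev rest
    else
      p :: bLoop c d v rest

def bPass (c : Nat) (sc : Int) (path : List (List Int)) : List (List Int) :=
  let prev := (path.getD 1 []).getD c 0
  path.take 2 ++ bLoop c (cmpI sc prev) prev (path.drop 2)

def linearMovement_alt (start : List Int) (path : List (List Int)) : Option (List (List Int)) :=
  if path.length < 2 then none
  else some (bPass 1 (start.getD 1 0) (bPass 0 (start.getD 0 0) path))

-- ===== PRECONDITION & SPEC =====
-- Pre_ excludes exactly the inputs where Python A raises IndexError: when len(path) ≥ 2,
-- A reads start[0], start[1] and both coordinates of every point from path[1] on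
-- (path[0] is never read); when len(path) < 2 A returns None without reading anything.
def Pre_linearMovement (start : List Int) (path : List (List Int)) : Prop :=
  path.length < 2 ∨ (2 ≤ start.length ∧ ∀ p ∈ path.drop 1, 2 ≤ p.length)
instance (start : List Int) (path : List (List Int)) : Decidable (Pre_linearMovement start path) := by
  unfold Pre_linearMovement; infer_instance

def pvWitness_linearMovement : List Int × List (List Int) :=
  ([0, 5], [[0, 0], [1, 1], [0, 3], [2, 2]])

def Spec_linearMovement (start : List Int) (path : List (List Int)) (out : Option (List (List Int))) : Prop := out = linearMovement_alt start path
instance (start : List Int) (path : List (List Int)) (out : Option (List (List Int))) : Decidable (Spec_linearMovement start path out) := by unfold Spec_linearMovement; infer_instance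

-- ===== CLAIM (what is proved, stated in full; the proofs are below) =====
def Claim_equal_linearMovement : Prop := ∀ (start : List Int) (path : List (List Int)), Dom_linearMovement start path → Pre_linearMovement start path → Spec_linearMovement start path (linearMovement start path)

-- ===== LEMMAS AND PROOFS =====

-- reference single sweep on Int directions; both ports are reduced to it
def dirStr (d : Int) : String := if d < 0 then "up" else if d > 0 then "down" else "unknown"

def refLoop : Int → Int → Int → Int → List (List Int) → List (List Int)
  | _, _, _, _, [] => []
  | dx, dy, px, py, p :: rest =>
    let x := p.getD 0 0
    let y := p.getD 1 0
    let dx' := if dx = 0 then cmpI px x else dx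
    let dy' := if dy = 0 then cmpI py y else dy
    let x' := if (dx' < 0 ∧ x < px) ∨ (dx' > 0 ∧ x > px) then px else x
    let y' := if (dy' < 0 ∧ y < py) ∨ (dy' > 0 ∧ y > py) then py else y
    let p1 := if (dx' < 0 ∧ x < px) ∨ (dx' > 0 ∧ x > px) then p.set 0 px else p
    let p2 := if (dy' < 0 ∧ y < py) ∨ (dy' > 0 ∧ y > py) then p1.set 1 py else p1
    p2 :: refLoop dx' dy' x' y' rest

theorem checkForDirection_eq (a b : List Int) (c : Nat) :
    checkForDirection a b c = dirStr (cmpI (a.getD c 0) (b.getD c 0)) := by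
  simp only [checkForDirection, dirStr, cmpI]
  split_ifs <;> first | rfl | omega
theorem dirStr_eq_unknown (d : Int) : (dirStr d = "unknown") ↔ d = 0 := by
  simp only [dirStr]; split_ifs <;> simp_all <;> omega
theorem checkIfLinear_dirStr (f t : List Int) (d : Int) (c : Nat) :
    checkIfLinear f t (dirStr d) c
      = !decide ((d < 0 ∧ t.getD c 0 < f.getD c 0) ∨ (d > 0 ∧ t.getD c 0 > f.getD c 0)) := by
  simp only [checkIfLinear, dirStr]
  split_ifs <;> simp_all <;> omega
theorem getD_append_len (pre : List (List Int)) (p : List Int) (rest : List (List Int)) :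
    (pre ++ p :: rest).getD pre.length [] = p := by
  induction pre with
  | nil => rfl
  | cons a t ih => simpa using ih
theorem set_append_len (pre : List (List Int)) (p q : List Int) (rest : List (List Int)) :
    (pre ++ p :: rest).set pre.length q = pre ++ q :: rest := by
  induction pre with
  | nil => rfl
  | cons a t ih => simp [ih]
theorem getD_last_append (pre suf : List (List Int)) (h : pre ≠ []) :
    (pre ++ suf).getD (pre.length - 1) [] = pre.getLastD [] := by
  induction pre with
  | nil => simp at h
  | cons a t ih =>
    cases t with
    | nil => simp [List.getD]
    | cons b u => simpa [List.getD] using ih (by simp)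
theorem getD_set01 (l : List Int) (v : Int) : (l.set 0 v).getD 1 0 = l.getD 1 0 := by
  simp [List.getD]
theorem getD_set10 (l : List Int) (v : Int) : (l.set 1 v).getD 0 0 = l.getD 0 0 := by
  simp [List.getD]
theorem getD_set_self0 (l : List Int) (v : Int) (h : 0 < l.length) : (l.set 0 v).getD 0 0 = v := by
  simp [List.getD, h]
theorem getD_set_self1 (l : List Int) (v : Int) (h : 1 < l.length) : (l.set 1 v).getD 1 0 = v := by
  simp [List.getD, h]
theorem getLastD_concat' (pre : List (List Int)) (p : List Int) : (pre ++ [p]).getLastD [] = p := by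
  induction pre with
  | nil => rfl
  | cons a t ih =>
    cases t with
    | nil => rfl
    | cons b u => simpa using ih

theorem loopA_eq (suf : List (List Int)) : ∀ (pre : List (List Int)) (dx dy : Int) (fuel : Nat),
    pre ≠ [] → (∀ p ∈ suf, 2 ≤ p.length) → 2 * suf.length + 2 ≤ fuel →
    loopA fuel (pre.length - 1) (dirStr dx) (dirStr dy) (pre ++ suf)
      = pre ++ refLoop dx dy ((pre.getLastD []).getD 0 0) ((pre.getLastD []).getD 1 0) suf := by
  induction suf with
  | nil =>
    intro pre dx dy fuel hpre _ hfuel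
    have hl : 1 ≤ pre.length := List.length_pos_of_ne_nil hpre
    obtain ⟨f, rfl⟩ : ∃ f, fuel = f + 1 := ⟨fuel - 1, by omega⟩
    simp only [List.append_nil, refLoop, loopA]
    rw [if_pos (by omega : pre.length - 1 < pre.length),
        if_neg (by omega : ¬ (pre.length - 1 ≠ pre.length - 1))]
    obtain ⟨g, rfl⟩ : ∃ g, f = g + 1 := ⟨f - 1, by omega⟩
    simp only [loopA]
    rw [if_neg (by omega : ¬ (pre.length - 1 + 1 < pre.length))]
  | cons p rest ih =>
    intro pre dx dy fuel hpre hlen hfuel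
    have hl : 1 ≤ pre.length := List.length_pos_of_ne_nil hpre
    have hp : 2 ≤ p.length := hlen p (by simp)
    have hrest : ∀ q ∈ rest, 2 ≤ q.length := fun q hq => hlen q (by simp [hq])
    obtain ⟨f, rfl⟩ : ∃ f, fuel = f + 1 := ⟨fuel - 1, by omega⟩
    have hL : (pre ++ p :: rest).length = pre.length + rest.length + 1 := by
      simp [List.length_append]; omega
    have hidx1 : pre.length - 1 + 1 = pre.length := by omega
    simp only [loopA, refLoop]
    rw [if_pos (by omega : pre.length - 1 < (pre ++ p :: rest).length),
        if_pos (by omega : pre.length - 1 ≠ (pre ++ p :: rest).length - 1),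
        getD_last_append _ _ hpre, hidx1, getD_append_len]
    generalize hcur : pre.getLastD [] = cur
    have hdx : (if dirStr dx = "unknown" then checkForDirection cur p 0 else dirStr dx)
        = dirStr (if dx = 0 then cmpI (cur.getD 0 0) (p.getD 0 0) else dx) := by
      by_cases h0 : dx = 0
      · rw [h0, if_pos (by rw [dirStr_eq_unknown]), if_pos rfl, checkForDirection_eq]
      · rw [if_neg (by rw [dirStr_eq_unknown]; exact h0), if_neg h0]
    have hdy : (if dirStr dy = "unknown" then checkForDirection cur p 1 else dirStr dy)
        = dirStr (if dy = 0 then cmpI (cur.getD 1 0) (p.getD 1 0) else dy) := by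
      by_cases h0 : dy = 0
      · rw [h0, if_pos (by rw [dirStr_eq_unknown]), if_pos rfl, checkForDirection_eq]
      · rw [if_neg (by rw [dirStr_eq_unknown]; exact h0), if_neg h0]
    rw [hdx, hdy]
    set DX2 := (if dx = 0 then cmpI (cur.getD 0 0) (p.getD 0 0) else dx) with hDX2
    set DY2 := (if dy = 0 then cmpI (cur.getD 1 0) (p.getD 1 0) else dy) with hDY2
    have hpath1 : (if checkIfLinear cur p (dirStr DX2) 0 = true then pre ++ p :: rest
          else (pre ++ p :: rest).set pre.length (p.set 0 (cur.getD 0 0)))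
        = pre ++ (if (DX2 < 0 ∧ p.getD 0 0 < cur.getD 0 0 ∨ DX2 > 0 ∧ p.getD 0 0 > cur.getD 0 0)
            then p.set 0 (cur.getD 0 0) else p) :: rest := by
      rw [checkIfLinear_dirStr]
      by_cases hC : (DX2 < 0 ∧ p.getD 0 0 < cur.getD 0 0 ∨ DX2 > 0 ∧ p.getD 0 0 > cur.getD 0 0)
      · rw [if_neg (by rw [decide_eq_true hC]; simp), if_pos hC, set_append_len]
      · rw [if_pos (by rw [decide_eq_false hC]; rfl), if_neg hC]
    rw [hpath1]
    set CX := (DX2 < 0 ∧ p.getD 0 0 < cur.getD 0 0 ∨ DX2 > 0 ∧ p.getD 0 0 > cur.getD 0 0) with hCX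
    set p1 := (if CX then p.set 0 (cur.getD 0 0) else p) with hp1def
    have hp1len : p1.length = p.length := by
      rw [hp1def]; by_cases hC : CX <;> simp [hC]
    have hp1y : p1.getD 1 0 = p.getD 1 0 := by
      rw [hp1def]; by_cases hC : CX <;> simp [hC]
    have hp1x : p1.getD 0 0 = if CX then cur.getD 0 0 else p.getD 0 0 := by
      by_cases hC : CX
      · rw [hp1def, if_pos hC, if_pos hC]; exact getD_set_self0 _ _ (by omega)
      · rw [hp1def, if_neg hC, if_neg hC]
    simp only [getD_append_len]
    rw [checkIfLinear_dirStr, hp1y]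
    set CY := (DY2 < 0 ∧ p.getD 1 0 < cur.getD 1 0 ∨ DY2 > 0 ∧ p.getD 1 0 > cur.getD 1 0) with hCY
    have hfe : 2 * rest.length + 3 ≤ f := by simp at hfuel; omega
    by_cases hcY : CY
    · -- y gets clamped: the loop stays at the same index and revisits it
      rw [if_neg (by rw [decide_eq_true hcY]; simp), set_append_len, if_pos hcY]
      set p2 := p1.set 1 (cur.getD 1 0) with hp2def
      have hp2x : p2.getD 0 0 = p1.getD 0 0 := getD_set10 _ _
      have hp2y : p2.getD 1 0 = cur.getD 1 0 :=
        getD_set_self1 _ _ (by omega : 1 < p1.length)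
      obtain ⟨g, rfl⟩ : ∃ g, f = g + 1 := ⟨f - 1, by omega⟩
      have hL2 : (pre ++ p2 :: rest).length = pre.length + rest.length + 1 := by
        simp [List.length_append]; omega
      simp only [loopA]
      rw [if_pos (by omega : pre.length - 1 < (pre ++ p2 :: rest).length),
          if_pos (by omega : pre.length - 1 ≠ (pre ++ p2 :: rest).length - 1),
          getD_last_append _ _ hpre, hcur, hidx1, getD_append_len]
      have hDY2ne : DY2 ≠ 0 := by rcases hcY with ⟨h, _⟩ | ⟨h, _⟩ <;> omega
      have hdx2 : (if dirStr DX2 = "unknown" then checkForDirection cur p2 0 else dirStr DX2)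
          = dirStr DX2 := by
        by_cases h0 : DX2 = 0
        · have hCf : ¬ CX := by rw [hCX]; simp [h0]
          rw [if_pos (by rw [dirStr_eq_unknown]; exact h0), checkForDirection_eq, hp2x, hp1x,
              if_neg hCf]
          by_cases hdx0 : dx = 0
          · have h1 : cmpI (cur.getD 0 0) (p.getD 0 0) = 0 := by
              rw [hDX2, if_pos hdx0] at h0; exact h0
            rw [h1, h0]
          · exact absurd (by rw [hDX2, if_neg hdx0] at h0; exact h0) hdx0
        · rw [if_neg (by rw [dirStr_eq_unknown]; exact h0)]
      have hdy2 : (if dirStr DY2 = "unknown" then checkForDirection cur p2 1 else dirStr DY2)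
          = dirStr DY2 := by
        rw [if_neg (by rw [dirStr_eq_unknown]; exact hDY2ne)]
      rw [hdx2, hdy2]
      have hnoX : ¬ (DX2 < 0 ∧ (if CX then cur.getD 0 0 else p.getD 0 0) < cur.getD 0 0
          ∨ DX2 > 0 ∧ (if CX then cur.getD 0 0 else p.getD 0 0) > cur.getD 0 0) := by
        by_cases hC : CX
        · rw [if_pos hC]; rintro (⟨_, h⟩ | ⟨_, h⟩) <;> omega
        · rw [if_neg hC]; exact hC
      have hokX2 : checkIfLinear cur p2 (dirStr DX2) 0 = true := by
        rw [checkIfLinear_dirStr, hp2x, hp1x, decide_eq_false hnoX]; rfl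
      simp only [hokX2, if_true, getD_append_len]
      have hnoY : ¬ (DY2 < 0 ∧ cur.getD 1 0 < cur.getD 1 0
          ∨ DY2 > 0 ∧ cur.getD 1 0 > cur.getD 1 0) := by
        rintro (⟨_, h⟩ | ⟨_, h⟩) <;> omega
      have hokY2 : checkIfLinear cur p2 (dirStr DY2) 1 = true := by
        rw [checkIfLinear_dirStr, hp2y, decide_eq_false hnoY]; rfl
      rw [if_pos hokY2]
      rw [show pre ++ p2 :: rest = (pre ++ [p2]) ++ rest by simp,
          show pre.length = (pre ++ [p2]).length - 1 by simp,
          ih (pre ++ [p2]) DX2 DY2 g (by simp) hrest (by omega),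
          getLastD_concat', hp2x, hp1x, hp2y, if_pos hcY]
      simp [hCX]
    · -- y is fine: the loop advances
      rw [if_pos (by rw [decide_eq_false hcY]; rfl), if_neg hcY]
      rw [show pre ++ p1 :: rest = (pre ++ [p1]) ++ rest by simp,
          show pre.length = (pre ++ [p1]).length - 1 by simp,
          ih (pre ++ [p1]) DX2 DY2 f (by simp) hrest (by omega),
          getLastD_concat', hp1x, hp1y, if_neg hcY]
      simp [hCX]

theorem refLoop_eq_passes (suf : List (List Int)) : ∀ (dx dy px py : Int),
    bLoop 1 dy py (bLoop 0 dx px suf) = refLoop dx dy px py suf := by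
  induction suf with
  | nil => intros; rfl
  | cons p rest ih =>
    intro dx dy px py
    simp only [refLoop]
    by_cases hcX : ((if dx = 0 then cmpI px (p.getD 0 0) else dx) < 0 ∧ p.getD 0 0 < px)
        ∨ ((if dx = 0 then cmpI px (p.getD 0 0) else dx) > 0 ∧ p.getD 0 0 > px)
    · rw [show bLoop 0 dx px (p :: rest)
            = p.set 0 px :: bLoop 0 (if dx = 0 then cmpI px (p.getD 0 0) else dx) px rest by
          simp only [bLoop]; rw [if_pos hcX]]
      simp only [bLoop, getD_set01, if_pos hcX]
      by_cases hcY : ((if dy = 0 then cmpI py (p.getD 1 0) else dy) < 0 ∧ p.getD 1 0 < py)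
          ∨ ((if dy = 0 then cmpI py (p.getD 1 0) else dy) > 0 ∧ p.getD 1 0 > py)
      · rw [if_pos hcY, if_pos hcY, if_pos hcY, ih]
      · rw [if_neg hcY, if_neg hcY, if_neg hcY, ih]
    · rw [show bLoop 0 dx px (p :: rest)
            = p :: bLoop 0 (if dx = 0 then cmpI px (p.getD 0 0) else dx) (p.getD 0 0) rest by
          simp only [bLoop]; rw [if_neg hcX]]
      simp only [bLoop, if_neg hcX]
      by_cases hcY : ((if dy = 0 then cmpI py (p.getD 1 0) else dy) < 0 ∧ p.getD 1 0 < py)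
          ∨ ((if dy = 0 then cmpI py (p.getD 1 0) else dy) > 0 ∧ p.getD 1 0 > py)
      · rw [if_pos hcY, if_pos hcY, if_pos hcY, ih]
      · rw [if_neg hcY, if_neg hcY, if_neg hcY, ih]

-- ===== VERDICT (by name: the statement is the Claim_ definition above) =====
theorem linearMovement_spec : Claim_equal_linearMovement := by
  unfold Claim_equal_linearMovement
  intro start path _ hpre
  unfold Spec_linearMovement linearMovement linearMovement_alt
  by_cases hlt : path.length < 2
  · rw [if_pos hlt, if_pos hlt]
  · rw [if_neg hlt, if_neg hlt]
    obtain ⟨p0, p1, rest, rfl⟩ : ∃ p0 p1 rest, path = p0 :: p1 :: rest := by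
      cases path with
      | nil => simp at hlt
      | cons a t =>
        cases t with
        | nil => simp at hlt
        | cons b u => exact ⟨a, b, u, rfl⟩
    rcases hpre with h | ⟨hs, hdrop⟩
    · exact absurd h hlt
    have hrest : ∀ q ∈ rest, 2 ≤ q.length := fun q hq => hdrop q (by simp [hq])
    have e1 : ((p0 :: p1 :: rest) : List (List Int)).getD 1 [] = p1 := rfl
    rw [e1, checkForDirection_eq, checkForDirection_eq]
    have hA : loopA (2 * (p0 :: p1 :: rest : List (List Int)).length + 2) 1
        (dirStr (cmpI (start.getD 0 0) (p1.getD 0 0)))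
        (dirStr (cmpI (start.getD 1 0) (p1.getD 1 0))) (p0 :: p1 :: rest)
        = [p0, p1] ++ refLoop (cmpI (start.getD 0 0) (p1.getD 0 0))
            (cmpI (start.getD 1 0) (p1.getD 1 0)) (p1.getD 0 0) (p1.getD 1 0) rest := by
      have h := loopA_eq rest [p0, p1] (cmpI (start.getD 0 0) (p1.getD 0 0))
        (cmpI (start.getD 1 0) (p1.getD 1 0))
        (2 * (p0 :: p1 :: rest : List (List Int)).length + 2)
        (by simp) hrest (by simp; omega)
      simpa using h
    simp only [hA]
    have hB0 : bPass 0 (start.getD 0 0) (p0 :: p1 :: rest)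
        = p0 :: p1 :: bLoop 0 (cmpI (start.getD 0 0) (p1.getD 0 0)) (p1.getD 0 0) rest := by
      simp [bPass]
    have hB1 : ∀ L, bPass 1 (start.getD 1 0) (p0 :: p1 :: L)
        = p0 :: p1 :: bLoop 1 (cmpI (start.getD 1 0) (p1.getD 1 0)) (p1.getD 1 0) L := by
      intro L; simp [bPass]
    rw [hB0, hB1, refLoop_eq_passes]
    simp
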